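-- pv_equiv track=rewrite | github.com/NoahMollerstuen/Synapse | src/table.py | find_longest_matching_block
-- ===== SOURCE A (Python) =====
-- def find_longest_matching_block(str1: str, str2: str):
--     if len(str1) != len(str2):
--         raise ValueError("Strings must be the same length")
--
--     longest = 0
--     current = 0
--     for i in range(0, len(str1)):
--         if str1[i] == str2[i]:
--             current += 1
--         else:
--             if current > longest:
--                 longest = current
--             current = 0
--     if current > longest:
--         longest = current
--     return longest
-- ===== SOURCE B (Python) =====
-- def find_longest_matching_block(str1: str, str2: str):
--     if len(str1) != len(str2):
--         raise ValueError("Strings must be the same length")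
--     flags = ''.join('1' if a == b else '0' for a, b in zip(str1, str2))
--     return max(len(seg) for seg in flags.split('0'))
-- ===== Notes on version B (the rewrite author's own statement) =====
-- stated objective: idiomatic
-- what changed: Replaces the running-counter/running-max loop with a declarative pipeline: build a match-flag string with zip, split it on mismatches and take the maximal segment length.
import Mathlib
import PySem

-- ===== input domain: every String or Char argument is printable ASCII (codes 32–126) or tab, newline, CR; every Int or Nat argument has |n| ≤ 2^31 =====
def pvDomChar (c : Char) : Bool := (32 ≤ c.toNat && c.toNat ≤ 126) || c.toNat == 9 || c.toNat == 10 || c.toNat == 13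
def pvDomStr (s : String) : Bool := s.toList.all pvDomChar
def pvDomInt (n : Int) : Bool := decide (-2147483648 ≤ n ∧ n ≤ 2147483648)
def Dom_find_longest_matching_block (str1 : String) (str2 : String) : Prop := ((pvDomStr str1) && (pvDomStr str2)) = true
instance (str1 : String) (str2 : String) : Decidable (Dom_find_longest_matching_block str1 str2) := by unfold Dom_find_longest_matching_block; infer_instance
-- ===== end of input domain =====

-- B replaces A's running-counter/running-max loop by an idiomatic pipeline (zip flags, split on
-- mismatch, max segment length); equal on all same-length inputs (Pre_ excludes the ValueError case).


-- ===== PORT A =====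
-- literal port of A: index loop over range(len(str1)) with (longest, current) state
def find_longest_matching_block (str1 : String) (str2 : String) : Int :=
  if PySem.Str.len str1 ≠ PySem.Str.len str2 then 0  -- Python raises ValueError here; excluded by Pre_
  else
    let r := (PySem.List.pyRange 0 (PySem.Str.len str1) 1).foldl
      (fun (p : Int × Int) i =>
        if PySem.Str.pyGet? str1 i == PySem.Str.pyGet? str2 i then (p.1, p.2 + 1)
        else if p.2 > p.1 then (p.2, 0) else (p.1, 0))
      (0, 0)
    if r.2 > r.1 then r.2 else r.1

-- ===== PORT B =====
-- port of flags.split('0') followed by len: lengths of the maximal runs of `true`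
-- delimited by `false` (Python's split always yields at least one (possibly empty) segment)
def segLens : List Bool → List Nat
  | [] => [0]
  | true :: t =>
    match segLens t with
    | n :: rest => (n + 1) :: rest
    | [] => [1]  -- unreachable: segLens never returns []
  | false :: t => 0 :: segLens t

def find_longest_matching_block_alt (str1 : String) (str2 : String) : Int :=
  if PySem.Str.len str1 ≠ PySem.Str.len str2 then 0  -- Python raises ValueError here; excluded by Pre_
  else
    let flags := (str1.toList.zip str2.toList).map (fun p => p.1 == p.2)
    (((segLens flags).foldr Nat.max 0 : Nat) : Int)  -- max over the (nonempty) segment-length list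

-- ===== PRECONDITION & SPEC =====
-- A raises ValueError exactly when the lengths differ
def Pre_find_longest_matching_block (str1 : String) (str2 : String) : Prop :=
  PySem.Str.len str1 = PySem.Str.len str2
instance (str1 : String) (str2 : String) : Decidable (Pre_find_longest_matching_block str1 str2) := by
  unfold Pre_find_longest_matching_block; infer_instance
def pvWitness_find_longest_matching_block : String × String := ("abc", "axc")

def Spec_find_longest_matching_block (str1 : String) (str2 : String) (out : Int) : Prop := out = find_longest_matching_block_alt str1 str2
instance (str1 : String) (str2 : String) (out : Int) : Decidable (Spec_find_longest_matching_block str1 str2 out) := by unfold Spec_find_longest_matching_block; infer_instance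

-- ===== CLAIM (what is proved, stated in full; the proofs are below) =====
def Claim_equal_find_longest_matching_block : Prop := ∀ (str1 : String) (str2 : String), Dom_find_longest_matching_block str1 str2 → Pre_find_longest_matching_block str1 str2 → Spec_find_longest_matching_block str1 str2 (find_longest_matching_block str1 str2)

-- ===== LEMMAS AND PROOFS =====

-- the max of the run lengths, with the first run pre-extended by `cur`
def mseg (cur : Nat) : List Bool → Nat
  | [] => cur
  | true :: t => mseg (cur + 1) t
  | false :: t => Nat.max cur (mseg 0 t)

-- A's loop body and its final "if current > longest" step, named for the proofs
def stepA (p : Int × Int) (b : Bool) : Int × Int :=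
  if b then (p.1, p.2 + 1) else if p.2 > p.1 then (p.2, 0) else (p.1, 0)

def finA (p : Int × Int) : Int := if p.2 > p.1 then p.2 else p.1

lemma segLens_ne_nil (l : List Bool) : segLens l ≠ [] := by
  cases l with
  | nil => simp [segLens]
  | cons b t =>
    cases b <;> simp [segLens]
    cases h : segLens t <;> simp

lemma mseg_eq_segLens (l : List Bool) (cur : Nat) :
    mseg cur l = Nat.max (cur + (segLens l).headI) ((segLens l).tail.foldr Nat.max 0) := by
  induction l generalizing cur with
  | nil => simp [mseg, segLens]
  | cons b t ih =>
    have h := segLens_ne_nil t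
    cases hs : segLens t with
    | nil => exact absurd hs h
    | cons n rest =>
      cases b with
      | true =>
        simp only [mseg, segLens, hs, ih (cur + 1), List.headI, List.tail]
        have e : cur + 1 + n = cur + (n + 1) := by omega
        rw [e]
      | false =>
        simp only [mseg, segLens, hs, ih 0, List.headI, List.tail, List.foldr]
        simp

-- A's loop from any (longest, current) state computes max longest (mseg current flags)
lemma loop_eq_mseg (l : List Bool) (lg cur : Nat) :
    finA (l.foldl stepA ((lg : Int), (cur : Int))) = ((Nat.max lg (mseg cur l) : Nat) : Int) := by
  induction l generalizing lg cur with
  | nil =>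
    simp only [List.foldl, mseg, finA]
    split <;> push_cast <;> omega
  | cons b t ih =>
    rw [List.foldl_cons]
    cases b with
    | true =>
      have h1 : stepA ((lg : Int), (cur : Int)) true = ((lg : Int), ((cur + 1 : Nat) : Int)) := by
        simp [stepA]
      rw [h1, ih, mseg]
    | false =>
      by_cases hc : (cur : Int) > (lg : Int)
      · have h1 : stepA ((lg : Int), (cur : Int)) false = ((cur : Int), ((0 : Nat) : Int)) := by
          simp [stepA, hc]
        rw [h1, ih]
        have hlt : lg < cur := by exact_mod_cast hc
        have : Nat.max cur (mseg 0 t) = Nat.max lg (mseg cur (false :: t)) := by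
          simp only [mseg, Nat.max_def]; split_ifs <;> omega
        rw [this]
      · have h1 : stepA ((lg : Int), (cur : Int)) false = ((lg : Int), ((0 : Nat) : Int)) := by
          simp [stepA, hc]
        rw [h1, ih]
        have hle : cur ≤ lg := by
          have h2 : ¬ ((lg : Int) < (cur : Int)) := hc
          exact_mod_cast not_lt.mp h2
        have : Nat.max lg (mseg 0 t) = Nat.max lg (mseg cur (false :: t)) := by
          simp only [mseg, Nat.max_def]; split_ifs <;> omega
        rw [this]

-- index loop over both strings = fold over the zipped character list
lemma foldl_range_get_eq_zip (l1 l2 : List Char) (h : l1.length = l2.length)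
    (f : Int × Int → Bool → Int × Int) (init : Int × Int) :
    (PySem.List.pyRange 0 (l1.length : Int) 1).foldl
      (fun p i => f p (PySem.List.pyGet? l1 i == PySem.List.pyGet? l2 i)) init
    = (l1.zip l2).foldl (fun p q => f p (q.1 == q.2)) init := by
  have hz : (l1.zip l2).length = l1.length := by
    simp [List.length_zip, h]
  have step1 : (PySem.List.pyRange 0 (l1.length : Int) 1).foldl
      (fun p i => f p (PySem.List.pyGet? l1 i == PySem.List.pyGet? l2 i)) init
      = (PySem.List.pyRange 0 (((l1.zip l2).length : Nat) : Int) 1).foldl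
      (fun p i => (fun p q => f p (Prod.fst q == Prod.snd q)) p
        (PySem.List.pyGetD (l1.zip l2) i ((' ', ' ')))) init := by
    rw [hz]
    apply PySem.List.foldl_congr_mem
    intro acc x hx
    rw [PySem.List.mem_pyRange_one] at hx
    obtain ⟨hx0, hxn⟩ := hx
    have hxl1 : x < (l1.length : Int) := hxn
    have hxl2 : x < (l2.length : Int) := by omega
    have hxz : x < ((l1.zip l2).length : Int) := by rw [hz]; omega
    rw [PySem.List.pyGet?_eq_some_getElem l1 hx0 hxl1,
        PySem.List.pyGet?_eq_some_getElem l2 hx0 hxl2,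
        PySem.List.pyGetD_eq_getElem (l1.zip l2) (' ', ' ') hx0 hxz]
    simp [List.getElem_zip]
  rw [step1]
  exact PySem.List.foldl_pyRange_zero_pyGetD' (l1.zip l2) (' ', ' ')
    (fun p q => f p (q.1 == q.2)) init

lemma ne_of_len_eq (str1 str2 : String)
    (hp : PySem.Str.len str1 = PySem.Str.len str2) :
    ¬ PySem.Str.len str1 ≠ PySem.Str.len str2 := by simpa using hp

-- ===== VERDICT (by name: the statement is the Claim_ definition above) =====
theorem find_longest_matching_block_spec : Claim_equal_find_longest_matching_block := by
  intro str1 str2 _ hp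
  unfold Spec_find_longest_matching_block find_longest_matching_block find_longest_matching_block_alt
  rw [if_neg (ne_of_len_eq _ _ hp), if_neg (ne_of_len_eq _ _ hp)]
  have hlen : str1.toList.length = str2.toList.length := by
    have hp' : PySem.Str.len str1 = PySem.Str.len str2 := hp
    rw [PySem.Str.len_eq, PySem.Str.len_eq] at hp'
    exact_mod_cast hp'
  -- A's loop = fold of stepA over the flag list, finished by finA
  have hA : (fun (r : Int × Int) => if r.2 > r.1 then r.2 else r.1)
      ((PySem.List.pyRange 0 (PySem.Str.len str1) 1).foldl
        (fun (p : Int × Int) i =>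
          if PySem.Str.pyGet? str1 i == PySem.Str.pyGet? str2 i then (p.1, p.2 + 1)
          else if p.2 > p.1 then (p.2, 0) else (p.1, 0)) (0, 0))
      = finA (((str1.toList.zip str2.toList).map (fun p => p.1 == p.2)).foldl stepA
          (((0 : Nat) : Int), ((0 : Nat) : Int))) := by
    rw [PySem.Str.len_eq, List.foldl_map]
    have hz := foldl_range_get_eq_zip str1.toList str2.toList hlen stepA
      (((0 : Nat) : Int), ((0 : Nat) : Int))
    have hb : (PySem.List.pyRange 0 ((str1.toList.length : Nat) : Int) 1).foldl
        (fun (p : Int × Int) i =>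
          if PySem.Str.pyGet? str1 i == PySem.Str.pyGet? str2 i then (p.1, p.2 + 1)
          else if p.2 > p.1 then (p.2, 0) else (p.1, 0)) (0, 0)
        = (PySem.List.pyRange 0 ((str1.toList.length : Nat) : Int) 1).foldl
        (fun p i => stepA p (PySem.List.pyGet? str1.toList i == PySem.List.pyGet? str2.toList i))
        (((0 : Nat) : Int), ((0 : Nat) : Int)) := by
      apply PySem.List.foldl_congr_mem
      intro acc x _
      simp [stepA, PySem.Str.pyGet?]
    rw [hb, hz]
    rfl
  show (fun (r : Int × Int) => if r.2 > r.1 then r.2 else r.1) _ = _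
  rw [hA, loop_eq_mseg, mseg_eq_segLens]
  show _ = ((List.foldr Nat.max 0
      (segLens ((str1.toList.zip str2.toList).map (fun p => p.1 == p.2))) : Nat) : Int)
  have h := segLens_ne_nil ((str1.toList.zip str2.toList).map (fun p => p.1 == p.2))
  cases hs : segLens ((str1.toList.zip str2.toList).map (fun p => p.1 == p.2)) with
  | nil => exact absurd hs h
  | cons n rest =>
    simp only [List.headI, List.tail, List.foldr, Nat.zero_add, Nat.zero_max]
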